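-- pv_equiv track=rewrite | github.com/pauburk/hmc_cs_5 | hw4/hw4pr1.py | ternaryToBalancedNum
-- ===== SOURCE A (Python) =====
-- def ternaryToBalancedNum(S):
--     """
--         Results: returns S in decimal
--         Arguments:
--             S = a string in balanced ternary
--     """
--     if S == "":
--         return 0
--     elif S[-1] == "0":
--         return 3*ternaryToBalancedNum(S[:-1]) + 1
--     elif S[-1] == "+":
--         return 3*ternaryToBalancedNum(S[:-1]) + 2
--     else:
--         return 3*ternaryToBalancedNum(S[:-1]) + 0
-- ===== SOURCE B (Python) =====
-- def ternaryToBalancedNum(S):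
--     """
--         Results: returns S in decimal
--         Arguments:
--             S = a string in balanced ternary
--     """
--     if S == "":
--         return 0
--     digits = ''.join('1' if c == '0' else '2' if c == '+' else '0' for c in S)
--     return int(digits, 3)
-- ===== Notes on version B (the rewrite author's own statement) =====
-- stated objective: idiomatic
-- what changed: B replaces A's right-to-left Horner recursion on string slices with a single normalization pass mapping each character to a base-3 digit and one int(digits, 3) library call.
import Mathlib
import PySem

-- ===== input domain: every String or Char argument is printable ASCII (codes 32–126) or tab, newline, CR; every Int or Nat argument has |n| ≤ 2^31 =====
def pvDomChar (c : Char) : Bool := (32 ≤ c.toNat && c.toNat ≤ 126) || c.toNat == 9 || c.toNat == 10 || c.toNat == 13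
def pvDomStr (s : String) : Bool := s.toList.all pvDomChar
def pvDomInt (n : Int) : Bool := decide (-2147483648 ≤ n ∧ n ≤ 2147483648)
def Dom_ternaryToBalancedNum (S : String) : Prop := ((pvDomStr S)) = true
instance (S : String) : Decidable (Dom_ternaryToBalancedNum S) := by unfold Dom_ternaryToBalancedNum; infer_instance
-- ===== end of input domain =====

-- B replaces A's right-to-left Horner recursion on string slices with one normalization pass
-- to a base-3 digit string followed by a single base-3 parse (idiomatic; proved equal on all inputs).


-- ===== PORT A =====
-- A recurses on S[:-1] inspecting S[-1]; on List Char, S[:-1] is dropLast and S[-1] is getLast (exact).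
def ttbAuxA (l : List Char) : Int :=
  if h : l = [] then 0
  else if l.getLast h = '0' then 3 * ttbAuxA l.dropLast + 1
  else if l.getLast h = '+' then 3 * ttbAuxA l.dropLast + 2
  else 3 * ttbAuxA l.dropLast + 0
termination_by l.length
decreasing_by all_goals
  have hp := List.length_pos_iff.mpr h
  simp [List.length_dropLast]
  omega

def ternaryToBalancedNum (S : String) : Int := ttbAuxA S.toList

-- ===== PORT B =====
-- the generator's per-character translation '1' if c=='0' else '2' if c=='+' else '0'
def ttbNorm (c : Char) : Char := if c = '0' then '1' else if c = '+' then '2' else '0'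

-- hand port of int(digits, 3): left-to-right accumulation acc*3 + digit value; exact here since
-- every character of digits is one of '0'/'1'/'2' by construction.
def ttbParse3 (l : List Char) : Int := l.foldl (fun a c => 3 * a + ((c.toNat : Int) - 48)) 0

def ternaryToBalancedNum_alt (S : String) : Int :=
  if S.toList = [] then 0 else ttbParse3 (S.toList.map ttbNorm)

-- ===== PRECONDITION & SPEC =====
def Spec_ternaryToBalancedNum (S : String) (out : Int) : Prop := out = ternaryToBalancedNum_alt S
instance (S : String) (out : Int) : Decidable (Spec_ternaryToBalancedNum S out) := by unfold Spec_ternaryToBalancedNum; infer_instance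

-- ===== CLAIM (what is proved, stated in full; the proofs are below) =====
def Claim_equal_ternaryToBalancedNum : Prop := ∀ (S : String), Dom_ternaryToBalancedNum S → Spec_ternaryToBalancedNum S (ternaryToBalancedNum S)

-- ===== LEMMAS AND PROOFS =====

theorem ttbAuxA_concat (l : List Char) (c : Char) :
    ttbAuxA (l ++ [c]) =
      3 * ttbAuxA l + (if c = '0' then 1 else if c = '+' then 2 else 0) := by
  rw [ttbAuxA]
  simp
  split_ifs <;> simp

theorem ttbAuxA_eq_parse3 (l : List Char) : ttbAuxA l = ttbParse3 (l.map ttbNorm) := by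
  induction l using List.reverseRecOn with
  | nil => simp [ttbAuxA, ttbParse3]
  | append_singleton l c ih =>
      rw [ttbAuxA_concat, ih]
      simp [ttbParse3, ttbNorm, List.foldl_append]
      split_ifs <;> simp [Char.toNat]

-- ===== VERDICT (by name: the statement is the Claim_ definition above) =====
theorem ternaryToBalancedNum_spec : Claim_equal_ternaryToBalancedNum := by
  intro S _
  unfold Spec_ternaryToBalancedNum ternaryToBalancedNum ternaryToBalancedNum_alt
  by_cases h : S.toList = []
  · simp [h, ttbAuxA]
  · simp [h, ttbAuxA_eq_parse3]
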